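-- pv_equiv track=rewrite | github.com/peterwilliams97/aoc | aoc2024-day16.py | reconstruct_paths
-- ===== SOURCE A (Python) =====
-- def reconstruct_paths(predecessors, end):
--     "Reconstruct the paths traversed from the `predecessors` dictionary starting at `end`."
--     stack = [[end]]
--     paths = []
--     while stack:
--         path = stack.pop()
--         current = path[-1]
--         if current not in predecessors: paths.append(path)
--         else: stack.extend(path + [pred] for pred in predecessors[current])
--     return [[(y, x) for (y, x, _, _) in path] for path in paths]
-- ===== SOURCE B (Python) =====
-- def reconstruct_paths(predecessors, end):
--     "Reconstruct the paths traversed from the `predecessors` dictionary starting at `end`."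
--     # Recursive DFS instead of A's explicit stack; mapping to (y, x) happens at emit
--     # time.  Each node's predecessors are taken in reversed order, which is the order
--     # A's LIFO stack explores them, so the emitted list is identical.
--     paths = []
--
--     def recurse(path):
--         current = path[-1]
--         if current not in predecessors:
--             paths.append([(y, x) for (y, x, _, _) in path])
--         else:
--             for pred in reversed(predecessors[current]):
--                 recurse(path + [pred])
--
--     recurse([end])
--     return paths
-- ===== Notes on version B (the rewrite author's own statement) =====
-- stated objective: alternative
-- what changed: Replaces A's explicit-stack while-loop (pop a partial path, push its extensions, map all paths to (y,x) in a final comprehension) by a recursive DFS helper that walks each node's predecessors in reversed order (the order A's LIFO stack explores them) and emits the already-mapped (y,x) path at each leaf.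
-- outside the precondition, e.g. on reconstruct_paths({(1, 2): []}, (1, 2)): A returns [], B returns []
import Mathlib
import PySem

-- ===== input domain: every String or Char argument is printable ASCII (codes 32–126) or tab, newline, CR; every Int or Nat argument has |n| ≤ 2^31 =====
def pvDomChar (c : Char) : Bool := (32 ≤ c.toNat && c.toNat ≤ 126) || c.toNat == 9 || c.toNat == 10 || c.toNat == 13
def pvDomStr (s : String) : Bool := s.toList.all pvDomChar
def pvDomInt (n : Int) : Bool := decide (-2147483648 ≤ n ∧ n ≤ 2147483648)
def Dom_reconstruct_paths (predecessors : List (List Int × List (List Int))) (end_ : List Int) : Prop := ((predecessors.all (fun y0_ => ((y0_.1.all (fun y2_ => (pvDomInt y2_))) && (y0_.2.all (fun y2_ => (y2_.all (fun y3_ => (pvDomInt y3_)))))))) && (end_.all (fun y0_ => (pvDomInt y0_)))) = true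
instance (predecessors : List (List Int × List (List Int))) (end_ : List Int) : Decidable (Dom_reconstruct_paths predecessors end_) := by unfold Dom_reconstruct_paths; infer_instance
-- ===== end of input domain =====

-- B replaces A's explicit-stack while-loop by a recursive DFS that emits the mapped
-- (y, x) path at each leaf (objective: alternative decomposition; equal RETURN values
-- are proved below on Pre_).

-- ===== PORT A =====
-- dict lookup `predecessors[current]` / `current in predecessors` (first match; Pre_ demands distinct keys)
def pvLookup (preds : List (List Int × List (List Int))) (v : List Int) : Option (List (List Int)) :=
  match preds with
  | [] => none
  | (k, ps) :: r => if v = k then some ps else pvLookup r v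

-- `[(y, x) for (y, x, _, _) in path]`; Pre_ guarantees every reachable node has exactly
-- 4 components, so the `_ => []` arm is never reached on admitted inputs.
def pvMapPath (path : List (List Int)) : List (List Int) :=
  path.map (fun node =>
    match node with
    | [y, x, _, _] => [y, x]
    | _ => [])

-- fuel bound for A's while-loop (totality guard only: under Pre_ the loop pops exactly
-- pvWf preds (preds.length+1) end_ times, proved below)
def pvWf (preds : List (List Int × List (List Int))) : Nat → List Int → Nat
  | 0, _ => 1
  | f + 1, c =>
    match pvLookup preds c with
    | none => 1
    | some ps => 1 + (ps.map (pvWf preds f)).sum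

-- A's while-loop; the stack is held top-first (Python's `pop()` = head, `extend` of the
-- children = push them reversed at the head), `paths` accumulates in append order as in A.
def pvLoopA (preds : List (List Int × List (List Int))) :
    Nat → List (List (List Int)) → List (List (List Int)) → List (List (List Int))
  | 0, _, paths => paths
  | _ + 1, [], paths => paths
  | f + 1, path :: rest, paths =>
    let current := path.getLast?.getD []   -- path[-1]; stack paths are never empty
    match pvLookup preds current with
    | none => pvLoopA preds f rest (paths ++ [path])
    | some ps => pvLoopA preds f ((ps.map (fun p => path ++ [p])).reverse ++ rest) paths

def reconstruct_paths (predecessors : List (List Int × List (List Int))) (end_ : List Int) : List (List (List Int)) :=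
  (pvLoopA predecessors (pvWf predecessors (predecessors.length + 1) end_) [[end_]] []).map pvMapPath

-- ===== PORT B =====
-- B's `recurse`: DFS over the predecessors in reversed order, emitting the mapped path
-- at each leaf; the fuel (recursion depth bound) is a totality guard only — under Pre_
-- the depth never exceeds predecessors.length + 1.
def pvGoB (preds : List (List Int × List (List Int))) : Nat → List (List Int) → List (List (List Int))
  | 0, _ => []
  | f + 1, path =>
    let current := path.getLast?.getD []
    match pvLookup preds current with
    | none => [pvMapPath path]
    | some ps => ps.reverse.flatMap (fun p => pvGoB preds f (path ++ [p]))

def reconstruct_paths_alt (predecessors : List (List Int × List (List Int))) (end_ : List Int) : List (List (List Int)) :=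
  pvGoB predecessors (predecessors.length + 1) [end_]

-- ===== PRECONDITION & SPEC =====
-- reachability from a node, by saturation of the one-step predecessor relation
def pvAdd (acc : List (List Int)) (p : List Int) : List (List Int) :=
  if p ∈ acc then acc else acc ++ [p]

def pvStepEntry (S : List (List Int)) (acc : List (List Int)) (kv : List Int × List (List Int)) : List (List Int) :=
  if kv.1 ∈ S then kv.2.foldl pvAdd acc else acc

def pvStep (L : List (List Int × List (List Int))) (S : List (List Int)) : List (List Int) :=
  L.foldl (pvStepEntry S) S

def pvSatAux (L : List (List Int × List (List Int))) : Nat → List (List Int) → List (List Int)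
  | 0, S => S
  | f + 1, S => if pvStep L S = S then S else pvSatAux L f (pvStep L S)

def pvReach (L : List (List Int × List (List Int))) (c : List Int) : List (List Int) :=
  pvSatAux L (1 + (c :: L.flatMap (fun kv => kv.2)).dedup.length) [c]

-- pvReach computes the set of nodes reachable from `c` by the standard saturation of the
-- one-step predecessor relation (a transitive closure; finite-graph reachability has no
-- iteration-free decidable statement).  It is not a copy of either port's recursion: the
-- ports enumerate paths, pvReach only saturates a node set.
-- Pre_ admits dictionaries with pairwise-distinct keys (the association list stands for
-- a Python dict; on duplicate keys the list's first-match lookup and the dict disagree)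
-- in which no key reachable from end_ lies on a cycle (on such a cycle A's while-loop
-- diverges) and every node reachable from end_ is a 4-tuple (A's final comprehension
-- raises ValueError on an emitted node of another length).
def Pre_reconstruct_paths (predecessors : List (List Int × List (List Int))) (end_ : List Int) : Prop :=
  (predecessors.map Prod.fst).Nodup ∧
  (∀ kv ∈ predecessors, kv.1 ∈ pvReach predecessors end_ →
      ∀ p ∈ kv.2, kv.1 ∉ pvReach predecessors p) ∧
  (∀ v ∈ pvReach predecessors end_, v.length = 4)

instance (predecessors : List (List Int × List (List Int))) (end_ : List Int) : Decidable (Pre_reconstruct_paths predecessors end_) := by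
  unfold Pre_reconstruct_paths; infer_instance

def pvWitness_reconstruct_paths : (List (List Int × List (List Int))) × List Int :=
  ([([1, 1, 0, 0], [[2, 2, 0, 0], [3, 3, 0, 0]]), ([3, 3, 0, 0], [[4, 4, 0, 0]])], [1, 1, 0, 0])

def Spec_reconstruct_paths (predecessors : List (List Int × List (List Int))) (end_ : List Int) (out : List (List (List Int))) : Prop := out = reconstruct_paths_alt predecessors end_
instance (predecessors : List (List Int × List (List Int))) (end_ : List Int) (out : List (List (List Int))) : Decidable (Spec_reconstruct_paths predecessors end_ out) := by unfold Spec_reconstruct_paths; infer_instance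

-- ===== CLAIM (what is proved, stated in full; the proofs are below) =====
def Claim_equal_reconstruct_paths : Prop := ∀ (predecessors : List (List Int × List (List Int))) (end_ : List Int), Dom_reconstruct_paths predecessors end_ → Pre_reconstruct_paths predecessors end_ → Spec_reconstruct_paths predecessors end_ (reconstruct_paths predecessors end_)

-- ===== LEMMAS AND PROOFS =====

theorem foldlAdd_append (ps : List (List Int)) : ∀ acc, ∃ t, ps.foldl pvAdd acc = acc ++ t := by
  induction ps with
  | nil => intro acc; exact ⟨[], by simp⟩
  | cons p ps ih =>
    intro acc
    obtain ⟨t, ht⟩ := ih (pvAdd acc p)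
    by_cases h : p ∈ acc
    · exact ⟨t, by simpa [pvAdd, h] using ht⟩
    · refine ⟨p :: t, ?_⟩
      rw [List.foldl_cons, ht]
      simp [pvAdd, h]

theorem foldlAdd_mem_of_mem {a : List Int} (ps : List (List Int)) (acc : List (List Int))
    (h : a ∈ acc) : a ∈ ps.foldl pvAdd acc := by
  obtain ⟨t, ht⟩ := foldlAdd_append ps acc
  rw [ht]; exact List.mem_append_left _ h

theorem foldlAdd_mem {p : List Int} (ps : List (List Int)) (acc : List (List Int))
    (h : p ∈ ps) : p ∈ ps.foldl pvAdd acc := by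
  induction ps generalizing acc with
  | nil => simp at h
  | cons q ps ih =>
    rcases List.mem_cons.mp h with rfl | h
    · refine foldlAdd_mem_of_mem ps _ ?_
      unfold pvAdd
      split
      · assumption
      · simp
    · exact ih _ h

theorem foldlAdd_subset {X : List (List Int)} (ps : List (List Int)) (acc : List (List Int))
    (hacc : ∀ a ∈ acc, a ∈ X) (hps : ∀ p ∈ ps, p ∈ X) : ∀ a ∈ ps.foldl pvAdd acc, a ∈ X := by
  induction ps generalizing acc with
  | nil => simpa using hacc
  | cons q ps ih =>
    refine ih (pvAdd acc q) ?_ (fun p hp => hps p (List.mem_cons_of_mem _ hp))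
    intro a ha
    by_cases hq : q ∈ acc
    · exact hacc a (by simpa [pvAdd, hq] using ha)
    · simp only [pvAdd, if_neg hq, List.mem_append, List.mem_singleton] at ha
      rcases ha with ha | rfl
      · exact hacc a ha
      · exact hps a (List.mem_cons_self)

theorem foldlAdd_nodup (ps : List (List Int)) (acc : List (List Int))
    (h : acc.Nodup) : (ps.foldl pvAdd acc).Nodup := by
  induction ps generalizing acc with
  | nil => simpa using h
  | cons q ps ih =>
    refine ih (pvAdd acc q) ?_
    by_cases hq : q ∈ acc
    · simpa [pvAdd, hq] using h
    · simp only [pvAdd, if_neg hq]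
      refine (List.nodup_append).mpr ⟨h, List.nodup_singleton _, ?_⟩
      intro a ha b hb e
      exact hq ((e.trans (List.mem_singleton.mp hb)) ▸ ha)

theorem foldlStep_append (S : List (List Int)) (L : List (List Int × List (List Int))) :
    ∀ acc, ∃ t, L.foldl (pvStepEntry S) acc = acc ++ t := by
  induction L with
  | nil => intro acc; exact ⟨[], by simp⟩
  | cons e r ih =>
    intro acc
    obtain ⟨t, ht⟩ := ih (pvStepEntry S acc e)
    by_cases he : e.1 ∈ S
    · obtain ⟨u, hu⟩ := foldlAdd_append e.2 acc
      have h2 : pvStepEntry S acc e = acc ++ u := by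
        simp only [pvStepEntry, if_pos he]; exact hu
      rw [h2] at ht
      exact ⟨u ++ t, by rw [List.foldl_cons, h2, ht, List.append_assoc]⟩
    · exact ⟨t, by simpa [pvStepEntry, he] using ht⟩

theorem step_append (L : List (List Int × List (List Int))) (S : List (List Int)) :
    ∃ t, pvStep L S = S ++ t :=
  foldlStep_append S L S

theorem foldlStep_mem_of_mem {S : List (List Int)} {a : List Int}
    (L : List (List Int × List (List Int))) (acc : List (List Int)) (h : a ∈ acc) :
    a ∈ L.foldl (pvStepEntry S) acc := by
  obtain ⟨t, ht⟩ := foldlStep_append S L acc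
  rw [ht]; exact List.mem_append_left _ h

theorem step_mem {L : List (List Int × List (List Int))} {S : List (List Int)}
    {kv : List Int × List (List Int)} {p : List Int}
    (hkv : kv ∈ L) (hk : kv.1 ∈ S) (hp : p ∈ kv.2) : p ∈ pvStep L S := by
  have main : ∀ (M : List (List Int × List (List Int))) (acc : List (List Int)),
      kv ∈ M → p ∈ M.foldl (pvStepEntry S) acc := by
    intro M
    induction M with
    | nil => intro acc h; simp at h
    | cons e r ih =>
      intro acc hm
      rcases List.mem_cons.mp hm with rfl | hm
      · refine foldlStep_mem_of_mem r _ ?_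
        simp only [pvStepEntry, if_pos hk]
        exact foldlAdd_mem _ _ hp
      · exact ih _ hm
  exact main L S hkv

theorem step_subset {L : List (List Int × List (List Int))} {S X : List (List Int)}
    (hS : ∀ a ∈ S, a ∈ X) (hcl : ∀ kv ∈ L, kv.1 ∈ S → ∀ p ∈ kv.2, p ∈ X) :
    ∀ a ∈ pvStep L S, a ∈ X := by
  unfold pvStep
  have main : ∀ (M : List (List Int × List (List Int))) (acc : List (List Int)),
      (∀ kv ∈ M, kv.1 ∈ S → ∀ p ∈ kv.2, p ∈ X) → (∀ a ∈ acc, a ∈ X) →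
      ∀ a ∈ M.foldl (pvStepEntry S) acc, a ∈ X := by
    intro M
    induction M with
    | nil => intro acc _ hacc; simpa using hacc
    | cons e r ih =>
      intro acc hcl' hacc
      refine ih _ (fun kv hkv => hcl' kv (List.mem_cons_of_mem _ hkv)) ?_
      by_cases he : e.1 ∈ S
      · simp only [pvStepEntry, if_pos he]
        exact foldlAdd_subset _ _ hacc (hcl' e (List.mem_cons_self) he)
      · simpa [pvStepEntry, he] using hacc
  exact main L S hcl hS

theorem step_nodup (L : List (List Int × List (List Int))) (S : List (List Int))
    (h : S.Nodup) : (pvStep L S).Nodup := by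
  have main : ∀ (M : List (List Int × List (List Int))) (acc : List (List Int)),
      acc.Nodup → (M.foldl (pvStepEntry S) acc).Nodup := by
    intro M
    induction M with
    | nil => intro acc hacc; simpa using hacc
    | cons e r ih =>
      intro acc hacc
      refine ih _ ?_
      by_cases he : e.1 ∈ S
      · simp only [pvStepEntry, if_pos he]
        exact foldlAdd_nodup _ _ hacc
      · simpa [pvStepEntry, he] using hacc
  exact main L S h

theorem nodup_subset_length {S U : List (List Int)} (hn : S.Nodup) (hs : ∀ a ∈ S, a ∈ U) :
    S.length ≤ U.dedup.length := by
  have h1 : S.toFinset.card = S.length := by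
    rw [List.card_toFinset, List.dedup_eq_self.mpr hn]
  have h2 : S.toFinset ⊆ U.toFinset := by
    intro x hx
    rw [List.mem_toFinset] at hx ⊢
    exact hs x hx
  have h3 := Finset.card_le_card h2
  rw [h1, List.card_toFinset] at h3
  exact h3

theorem sat_fix (L : List (List Int × List (List Int))) :
    ∀ (f : Nat) (S U : List (List Int)), S.Nodup → (∀ a ∈ S, a ∈ U) →
      (∀ kv ∈ L, ∀ p ∈ kv.2, p ∈ U) → U.dedup.length + 1 ≤ S.length + f →
      pvStep L (pvSatAux L f S) = pvSatAux L f S := by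
  intro f
  induction f with
  | zero =>
    intro S U hn hs hu hlen
    have := nodup_subset_length hn hs
    omega
  | succ f ih =>
    intro S U hn hs hu hlen
    by_cases hfix : pvStep L S = S
    · simp [pvSatAux, hfix]
    · simp only [pvSatAux, if_neg hfix]
      obtain ⟨t, ht⟩ := step_append L S
      have hne : t ≠ [] := by
        intro h
        exact hfix (by rw [ht, h, List.append_nil])
      have hlen2 : S.length + 1 ≤ (pvStep L S).length := by
        rw [ht, List.length_append]
        cases t with
        | nil => exact absurd rfl hne
        | cons _ _ => simp
      refine ih (pvStep L S) U (step_nodup L S hn) ?_ hu (by omega)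
      exact step_subset hs (fun kv hkv _ p hp => hu kv hkv p hp)

theorem sat_mem (L : List (List Int × List (List Int))) :
    ∀ (f : Nat) (S : List (List Int)), ∀ a ∈ S, a ∈ pvSatAux L f S := by
  intro f
  induction f with
  | zero => intro S a ha; simpa [pvSatAux] using ha
  | succ f ih =>
    intro S a ha
    by_cases hfix : pvStep L S = S
    · simpa [pvSatAux, hfix] using ha
    · simp only [pvSatAux, if_neg hfix]
      refine ih (pvStep L S) a ?_
      obtain ⟨t, ht⟩ := step_append L S
      rw [ht]
      exact List.mem_append_left _ ha

theorem sat_least {X : List (List Int)} (L : List (List Int × List (List Int)))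
    (hcl : ∀ kv ∈ L, kv.1 ∈ X → ∀ p ∈ kv.2, p ∈ X) :
    ∀ (f : Nat) (S : List (List Int)), (∀ a ∈ S, a ∈ X) → ∀ a ∈ pvSatAux L f S, a ∈ X := by
  intro f
  induction f with
  | zero => intro S hS a ha; exact hS a (by simpa [pvSatAux] using ha)
  | succ f ih =>
    intro S hS a ha
    by_cases hfix : pvStep L S = S
    · exact hS a (by simpa [pvSatAux, hfix] using ha)
    · simp only [pvSatAux, if_neg hfix] at ha
      refine ih (pvStep L S) ?_ a ha
      exact step_subset hS (fun kv hkv hk p hp => hcl kv hkv (hS _ hk) p hp)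

theorem reach_fix (L : List (List Int × List (List Int))) (c : List Int) :
    pvStep L (pvReach L c) = pvReach L c := by
  refine sat_fix L _ [c] (c :: L.flatMap (fun kv => kv.2)) (List.nodup_singleton _) ?_ ?_ ?_
  · intro a ha
    simp at ha
    simp [ha]
  · intro kv hkv p hp
    simp only [List.mem_cons, List.mem_flatMap]
    exact Or.inr ⟨kv, hkv, hp⟩
  · simp; omega

theorem reach_self (L : List (List Int × List (List Int))) (c : List Int) :
    c ∈ pvReach L c := by
  exact sat_mem L _ [c] c (by simp)

theorem reach_closed {L : List (List Int × List (List Int))} {c k p : List Int}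
    {ps : List (List Int)} (hk : k ∈ pvReach L c) (hkv : (k, ps) ∈ L) (hp : p ∈ ps) :
    p ∈ pvReach L c := by
  rw [← reach_fix L c]
  exact step_mem hkv hk hp

theorem reach_trans {L : List (List Int × List (List Int))} {c p : List Int}
    (hp : p ∈ pvReach L c) : ∀ a ∈ pvReach L p, a ∈ pvReach L c := by
  refine sat_least L ?_ _ [p] ?_
  · intro kv hkv hk q hq
    exact reach_closed (c := c) (k := kv.1) (ps := kv.2) hk (by cases kv; exact hkv) hq
  · intro a ha
    simp at ha
    simp [ha, hp]

def pvRank (L : List (List Int × List (List Int))) (c : List Int) : Nat :=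
  ((pvReach L c).filter (fun v => decide (v ∈ L.map Prod.fst))).toFinset.card

def pvAcy (L : List (List Int × List (List Int))) (end_ : List Int) : Prop :=
  ∀ kv ∈ L, kv.1 ∈ pvReach L end_ → ∀ p ∈ kv.2, kv.1 ∉ pvReach L p

theorem lookup_mem {L : List (List Int × List (List Int))} {c : List Int}
    {ps : List (List Int)} (h : pvLookup L c = some ps) : (c, ps) ∈ L := by
  induction L with
  | nil => simp [pvLookup] at h
  | cons e r ih =>
    obtain ⟨k, qs⟩ := e
    by_cases hc : c = k
    · simp only [pvLookup, if_pos hc] at h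
      injection h with h
      subst h; subst hc
      exact List.mem_cons_self
    · simp only [pvLookup, if_neg hc] at h
      exact List.mem_cons_of_mem _ (ih h)

theorem rank_lt {L : List (List Int × List (List Int))} {end_ : List Int}
    (hacy : pvAcy L end_) {k p : List Int} {ps : List (List Int)}
    (hk : k ∈ pvReach L end_) (hkv : (k, ps) ∈ L) (hp : p ∈ ps) :
    pvRank L p < pvRank L k := by
  have hpk : p ∈ pvReach L k := reach_closed (reach_self L k) hkv hp
  have hsub : ∀ a ∈ pvReach L p, a ∈ pvReach L k := reach_trans hpk
  have hknot : k ∉ pvReach L p := hacy (k, ps) hkv hk p hp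
  unfold pvRank
  refine Finset.card_lt_card ?_
  rw [Finset.ssubset_iff_of_subset]
  · refine ⟨k, ?_, ?_⟩
    · simp only [List.mem_toFinset, List.mem_filter, decide_eq_true_eq]
      exact ⟨reach_self L k, List.mem_map.mpr ⟨(k, ps), hkv, rfl⟩⟩
    · simp only [List.mem_toFinset, List.mem_filter, decide_eq_true_eq, not_and]
      intro hmem
      exact absurd hmem hknot
  · intro x hx
    simp only [List.mem_toFinset, List.mem_filter, decide_eq_true_eq] at hx ⊢
    exact ⟨hsub x hx.1, hx.2⟩

theorem pvRank_le_len (L : List (List Int × List (List Int))) (c : List Int) :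
    pvRank L c ≤ L.length := by
  unfold pvRank
  have h1 : ((pvReach L c).filter (fun v => decide (v ∈ L.map Prod.fst))).toFinset
      ⊆ (L.map Prod.fst).toFinset := by
    intro x hx
    simp only [List.mem_toFinset, List.mem_filter, decide_eq_true_eq] at hx ⊢
    exact hx.2
  have h2 := Finset.card_le_card h1
  have h3 := List.toFinset_card_le (L.map Prod.fst)
  simp only [List.length_map] at h3
  omega

theorem W_pos (L : List (List Int × List (List Int))) (f : Nat) (c : List Int) :
    1 ≤ pvWf L f c := by
  cases f with
  | zero => simp [pvWf]
  | succ f =>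
    cases hl : pvLookup L c with
    | none => simp [pvWf, hl]
    | some ps => simp [pvWf, hl]

theorem W_stable {L : List (List Int × List (List Int))} {end_ : List Int}
    (hacy : pvAcy L end_) :
    ∀ (f f' : Nat) (c : List Int), c ∈ pvReach L end_ →
      pvRank L c < f → pvRank L c < f' → pvWf L f c = pvWf L f' c := by
  intro f
  induction f with
  | zero => intro f' c _ h _; omega
  | succ a ih =>
    intro f' c hc hfa hfb
    obtain ⟨b, rfl⟩ : ∃ b, f' = b + 1 := ⟨f' - 1, by omega⟩
    cases hl : pvLookup L c with
    | none => simp [pvWf, hl]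
    | some ps =>
      simp only [pvWf, hl]
      congr 1
      refine congrArg List.sum (List.map_congr_left ?_)
      intro p hp
      have hpr : p ∈ pvReach L end_ := reach_closed hc (lookup_mem hl) hp
      have hlt : pvRank L p < pvRank L c := rank_lt hacy hc (lookup_mem hl) hp
      exact ih b p hpr (by omega) (by omega)

theorem W_expand {L : List (List Int × List (List Int))} {end_ : List Int}
    (hacy : pvAcy L end_) {c : List Int} {ps : List (List Int)}
    (hc : c ∈ pvReach L end_) (hl : pvLookup L c = some ps) :
    pvWf L (L.length + 1) c = 1 + (ps.map (pvWf L (L.length + 1))).sum := by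
  simp only [pvWf, hl]
  congr 1
  refine congrArg List.sum (List.map_congr_left ?_)
  intro p hp
  have hpr : p ∈ pvReach L end_ := reach_closed hc (lookup_mem hl) hp
  have hlt : pvRank L p < pvRank L c := rank_lt hacy hc (lookup_mem hl) hp
  have hle := pvRank_le_len L c
  exact W_stable hacy L.length (L.length + 1) p hpr (by omega) (by omega)

theorem G_stable {L : List (List Int × List (List Int))} {end_ : List Int}
    (hacy : pvAcy L end_) :
    ∀ (f f' : Nat) (pre : List (List Int)) (c : List Int), c ∈ pvReach L end_ →
      pvRank L c < f → pvRank L c < f' → pvGoB L f (pre ++ [c]) = pvGoB L f' (pre ++ [c]) := by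
  intro f
  induction f with
  | zero => intro f' pre c _ h _; omega
  | succ a ih =>
    intro f' pre c hc hfa hfb
    obtain ⟨b, rfl⟩ : ∃ b, f' = b + 1 := ⟨f' - 1, by omega⟩
    have hlast : (pre ++ [c]).getLast?.getD [] = c := by simp
    cases hl : pvLookup L c with
    | none => simp [pvGoB, hl]
    | some ps =>
      simp only [pvGoB, hlast, hl]
      refine List.flatMap_congr ?_ -- pointwise equality of the branches
      intro p hp
      rw [List.mem_reverse] at hp
      have hpr : p ∈ pvReach L end_ := reach_closed hc (lookup_mem hl) hp
      have hlt : pvRank L p < pvRank L c := rank_lt hacy hc (lookup_mem hl) hp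
      exact ih b (pre ++ [c]) p hpr (by omega) (by omega)

theorem G_none {L : List (List Int × List (List Int))} {c : List Int}
    (hl : pvLookup L c = none) (pre : List (List Int)) :
    pvGoB L (L.length + 1) (pre ++ [c]) = [pvMapPath (pre ++ [c])] := by
  have hlast : (pre ++ [c]).getLast?.getD [] = c := by simp
  simp only [pvGoB, hlast, hl]

theorem G_some {L : List (List Int × List (List Int))} {end_ : List Int}
    (hacy : pvAcy L end_) {c : List Int} {ps : List (List Int)}
    (hc : c ∈ pvReach L end_) (hl : pvLookup L c = some ps) (pre : List (List Int)) :
    pvGoB L (L.length + 1) (pre ++ [c])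
      = ps.reverse.flatMap (fun p => pvGoB L (L.length + 1) ((pre ++ [c]) ++ [p])) := by
  have hlast : (pre ++ [c]).getLast?.getD [] = c := by simp
  simp only [pvGoB, hlast, hl]
  refine List.flatMap_congr ?_
  intro p hp
  rw [List.mem_reverse] at hp
  have hpr : p ∈ pvReach L end_ := reach_closed hc (lookup_mem hl) hp
  have hlt : pvRank L p < pvRank L c := rank_lt hacy hc (lookup_mem hl) hp
  have hle := pvRank_le_len L c
  exact G_stable hacy L.length (L.length + 1) (pre ++ [c]) p hpr (by omega) (by omega)

theorem loopA_inv {L : List (List Int × List (List Int))} {end_ : List Int}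
    (hacy : pvAcy L end_) :
    ∀ (f : Nat) (stack paths : List (List (List Int))),
      (∀ path ∈ stack, ∃ pre c, path = pre ++ [c] ∧ c ∈ pvReach L end_) →
      (stack.map (fun path => pvWf L (L.length + 1) (path.getLast?.getD []))).sum ≤ f →
      (pvLoopA L f stack paths).map pvMapPath
        = paths.map pvMapPath ++ stack.flatMap (pvGoB L (L.length + 1)) := by
  intro f
  induction f with
  | zero =>
    intro stack paths hst hm
    cases stack with
    | nil => simp [pvLoopA]
    | cons path rest =>
      exfalso
      have := W_pos L (L.length + 1) (path.getLast?.getD [])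
      simp [List.sum_cons] at hm
      omega
  | succ f ih =>
    intro stack paths hst hm
    cases stack with
    | nil => simp [pvLoopA]
    | cons path rest =>
      obtain ⟨pre, c, rfl, hcreach⟩ := hst path List.mem_cons_self
      have hlast : (pre ++ [c]).getLast?.getD [] = c := by simp
      simp only [List.map_cons, List.sum_cons, hlast] at hm
      cases hl : pvLookup L c with
      | none =>
        have hW := W_pos L (L.length + 1) c
        simp only [pvLoopA, hlast, hl]
        rw [ih rest (paths ++ [pre ++ [c]])
          (fun q hq => hst q (List.mem_cons_of_mem _ hq)) (by omega)]
        rw [List.flatMap_cons, G_none hl pre]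
        simp
      | some ps =>
        have hexp := W_expand hacy hcreach hl
        simp only [pvLoopA, hlast, hl]
        set g : List Int → List (List Int) := fun p => (pre ++ [c]) ++ [p] with hg
        have hm2 : (((ps.map g).reverse ++ rest).map
            (fun path => pvWf L (L.length + 1) (path.getLast?.getD []))).sum ≤ f := by
          rw [List.map_append, List.sum_append]
          have heq : ((ps.map g).reverse.map
              (fun path => pvWf L (L.length + 1) (path.getLast?.getD []))).sum
              = (ps.map (pvWf L (L.length + 1))).sum := by
            rw [← List.map_reverse, List.map_map]
            have hcomp : (fun path => pvWf L (L.length + 1) (path.getLast?.getD [])) ∘ g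
                = pvWf L (L.length + 1) := by
              funext p; simp [hg]
            rw [hcomp, List.map_reverse, List.sum_reverse]
          omega
        have hstk2 : ∀ q ∈ (ps.map g).reverse ++ rest,
            ∃ pre' c', q = pre' ++ [c'] ∧ c' ∈ pvReach L end_ := by
          intro q hq
          rcases List.mem_append.mp hq with h | h
          · rw [List.mem_reverse] at h
            obtain ⟨p, hp, rfl⟩ := List.mem_map.mp h
            exact ⟨pre ++ [c], p, rfl, reach_closed hcreach (lookup_mem hl) hp⟩
          · exact hst q (List.mem_cons_of_mem _ h)
        rw [ih _ paths hstk2 hm2]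
        congr 1
        rw [List.flatMap_append, List.flatMap_cons]
        congr 1
        rw [G_some hacy hcreach hl pre]
        rw [← List.map_reverse, List.flatMap_map]

-- ===== VERDICT (by name: the statement is the Claim_ definition above) =====
theorem reconstruct_paths_spec : Claim_equal_reconstruct_paths := by
  intro L end_ _ hpre
  obtain ⟨_, hacy, _⟩ := hpre
  unfold Spec_reconstruct_paths reconstruct_paths reconstruct_paths_alt
  have h := loopA_inv hacy (pvWf L (L.length + 1) end_) [[end_]] []
    (by intro path hp; simp at hp; exact ⟨[], end_, by simp [hp], reach_self L end_⟩)
    (by simp)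
  rw [h]
  simp
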